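-- pv_equiv track=rewrite | github.com/kapkappa/repo_analyze | github_lang_distribution.py | lang_distribution
-- ===== SOURCE A (Python) =====
-- import argparse, collections, csv, math, os, sys, time
-- from typing import List, Optional, Tuple, Callable
--
-- def is_unknown(repo:dict)->bool:
--     lang=repo.get("language")
--     return lang is None or (isinstance(lang,str) and not lang.strip())
--
-- def lang_distribution(repos:List[dict], exclude_unknown:bool=False):
--     ctr=collections.Counter(); included=[]; unknowns=[]
--     for r in repos:
--         if is_unknown(r):
--             unknowns.append(r)
--             if exclude_unknown: continue
--             lang="Unknown"
--         else:
--             lang=r.get("language") or "Unknown"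
--         ctr[lang]+=1; included.append(r)
--     total=sum(ctr.values())
--     return ctr,total,unknowns,included
-- ===== SOURCE B (Python) =====
-- import collections
--
-- def is_unknown(repo: dict) -> bool:
--     lang = repo.get("language")
--     return lang is None or (isinstance(lang, str) and not lang.strip())
--
-- def lang_distribution(repos, exclude_unknown: bool = False):
--     # Staged group-by: filter twice, project each kept repo to its label,
--     # then count each distinct label directly with list.count -- no running counter.
--     unknowns = [r for r in repos if is_unknown(r)]
--     included = [r for r in repos if not (exclude_unknown and is_unknown(r))]
--     labels = ["Unknown" if is_unknown(r) else (r.get("language") or "Unknown")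
--               for r in included]
--     ctr = collections.Counter({lab: labels.count(lab) for lab in dict.fromkeys(labels)})
--     return ctr, len(included), unknowns, included
-- ===== Notes on version B (the rewrite author's own statement) =====
-- stated objective: alternative
-- what changed: Replaces A's single fused loop with a running Counter and three accumulators by a staged group-by: two filters, a label projection, counts computed per distinct label via list.count over first-occurrence keys, and total taken as len(included) instead of summing the counter.
import Mathlib
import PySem

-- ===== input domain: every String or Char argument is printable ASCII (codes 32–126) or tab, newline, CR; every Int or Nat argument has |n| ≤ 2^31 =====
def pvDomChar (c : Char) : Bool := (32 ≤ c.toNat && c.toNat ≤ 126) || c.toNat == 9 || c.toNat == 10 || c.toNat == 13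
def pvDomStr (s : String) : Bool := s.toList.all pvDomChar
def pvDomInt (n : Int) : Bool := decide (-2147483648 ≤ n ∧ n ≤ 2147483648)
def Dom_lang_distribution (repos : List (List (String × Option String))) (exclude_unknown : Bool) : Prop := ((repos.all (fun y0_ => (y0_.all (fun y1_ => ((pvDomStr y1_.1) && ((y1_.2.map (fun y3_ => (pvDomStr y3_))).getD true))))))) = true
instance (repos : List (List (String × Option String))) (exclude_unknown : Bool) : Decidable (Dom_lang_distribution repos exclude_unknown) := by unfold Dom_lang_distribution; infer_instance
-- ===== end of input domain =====

-- B replaces A's fused loop (running Counter + three accumulators) by a staged group-by: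
-- filters, a label projection, per-distinct-label counts via list.count, total = len(included); objective: alternative.

-- ===== PORT A =====
-- is_unknown: repo.get("language") is None (missing key or stored None) or a string stripping to empty
def pyIsUnknown (r : List (String × Option String)) : Bool :=
  match (PySem.Dict.mk r).get? "language" with
  | none => true
  | some none => true
  | some (some s) => PySem.Str.strip s == ""

-- lang = r.get("language") or "Unknown"  (None or empty string is falsy and falls back to "Unknown")
def pyLangOrUnknown (r : List (String × Option String)) : String :=
  match (PySem.Dict.mk r).get? "language" with
  | some (some s) => if s == "" then "Unknown" else s
  | _ => "Unknown"

-- one iteration of A's for-loop, state = (ctr, included, unknowns)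
def stepA (exclude_unknown : Bool)
    (st : PySem.Dict String Int × List (List (String × Option String)) × List (List (String × Option String)))
    (r : List (String × Option String)) :
    PySem.Dict String Int × List (List (String × Option String)) × List (List (String × Option String)) :=
  if pyIsUnknown r then
    let unknowns := st.2.2 ++ [r]
    if exclude_unknown then (st.1, st.2.1, unknowns)
    else (st.1.modify "Unknown" 0 (· + 1), st.2.1 ++ [r], unknowns)
  else
    let lang := pyLangOrUnknown r
    (st.1.modify lang 0 (· + 1), st.2.1 ++ [r], st.2.2)

def lang_distribution (repos : List (List (String × Option String))) (exclude_unknown : Bool) : (List (String × Int)) × Int × (List (List (String × Option String))) × (List (List (String × Option String))) :=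
  let st := repos.foldl (stepA exclude_unknown) (PySem.Dict.empty, [], [])
  let ctr := st.1
  let total := ctr.values.sum
  (ctr.items, total, st.2.2, st.2.1)

-- ===== PORT B =====
def altLabel (r : List (String × Option String)) : String :=
  if pyIsUnknown r then "Unknown" else pyLangOrUnknown r

def lang_distribution_alt (repos : List (List (String × Option String))) (exclude_unknown : Bool) : (List (String × Int)) × Int × (List (List (String × Option String))) × (List (List (String × Option String))) :=
  let unknowns := repos.filter (fun r => pyIsUnknown r)
  let included := repos.filter (fun r => !(exclude_unknown && pyIsUnknown r))
  let labels := included.map altLabel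
  -- Counter({lab: labels.count(lab) for lab in dict.fromkeys(labels)}) as its item list
  let ctrItems := (PySem.List.dedup labels).map (fun lab => (lab, (labels.count lab : Int)))
  (ctrItems, (included.length : Int), unknowns, included)

-- ===== PRECONDITION & SPEC =====
def Spec_lang_distribution (repos : List (List (String × Option String))) (exclude_unknown : Bool) (out : (List (String × Int)) × Int × (List (List (String × Option String))) × (List (List (String × Option String)))) : Prop := out = lang_distribution_alt repos exclude_unknown
instance (repos : List (List (String × Option String))) (exclude_unknown : Bool) (out : (List (String × Int)) × Int × (List (List (String × Option String))) × (List (List (String × Option String)))) : Decidable (Spec_lang_distribution repos exclude_unknown out) := by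
  unfold Spec_lang_distribution
  -- instance search alone exceeds the default size limit on this 4-component product; give the Prod instances explicitly
  have h : DecidableEq ((List (String × Int)) × Int × (List (List (String × Option String))) × (List (List (String × Option String)))) :=
    @instDecidableEqProd _ _ _ (@instDecidableEqProd _ _ _ (@instDecidableEqProd _ _ _ _))
  exact h _ _

-- ===== CLAIM (what is proved, stated in full; the proofs are below) =====
def Claim_equal_lang_distribution : Prop := ∀ (repos : List (List (String × Option String))) (exclude_unknown : Bool), Dom_lang_distribution repos exclude_unknown → Spec_lang_distribution repos exclude_unknown (lang_distribution repos exclude_unknown)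

-- ===== LEMMAS AND PROOFS =====

-- A's loop with the state generalised: the counter accumulates the labels of the kept
-- elements, 'included'/'unknowns' accumulate the corresponding filters.
theorem foldA_inv (ex : Bool) (l : List (List (String × Option String)))
    (c : PySem.Dict String Int) (inc unk : List (List (String × Option String))) :
    l.foldl (stepA ex) (c, inc, unk)
    = (((l.filter (fun r => !(ex && pyIsUnknown r))).map altLabel).foldl
         (fun d x => d.modify x 0 (· + 1)) c,
       inc ++ l.filter (fun r => !(ex && pyIsUnknown r)),
       unk ++ l.filter (fun r => pyIsUnknown r)) := by
  induction l generalizing c inc unk with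
  | nil => simp
  | cons r t ih =>
    by_cases hu : pyIsUnknown r
    · cases ex with
      | true => simp [List.foldl_cons, stepA, hu, ih]
      | false => simp [List.foldl_cons, stepA, hu, ih, altLabel]
    · simp [List.foldl_cons, stepA, hu, ih, altLabel]

-- sum of the per-distinct-label counts = number of labels
theorem sum_counts_eq_length (xs : List String) :
    (((PySem.Set.ofList xs).map (fun k => (xs.count k : Int))).sum) = (xs.length : Int) := by
  have hperm : (PySem.Set.ofList xs).Perm xs.dedup := by
    apply (List.perm_ext_iff_of_nodup (PySem.Set.nodup_ofList xs) xs.nodup_dedup).2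
    intro a
    rw [PySem.Set.mem_ofList, List.mem_dedup]
  have hp2 : ((PySem.Set.ofList xs).map (fun k => (xs.count k : Int))).Perm
      (xs.dedup.map (fun k => (xs.count k : Int))) := hperm.map _
  rw [hp2.sum_eq]
  have := List.sum_map_count_dedup_eq_length xs
  rw [← this]
  push_cast
  rw [List.map_map]
  rfl

theorem lang_distribution_eq (repos : List (List (String × Option String))) (ex : Bool) :
    lang_distribution repos ex = lang_distribution_alt repos ex := by
  unfold lang_distribution lang_distribution_alt
  rw [foldA_inv]
  simp only [List.nil_append]
  rw [← PySem.Dict.counter_eq_foldl]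
  refine Prod.ext ?_ (Prod.ext ?_ rfl)
  · simp [PySem.Dict.items_counter, PySem.List.dedup_eq_ofList]
  · show (PySem.Dict.counter _).values.sum = _
    have hv : (PySem.Dict.counter ((repos.filter (fun r => !(ex && pyIsUnknown r))).map altLabel)).values
        = (PySem.Set.ofList ((repos.filter (fun r => !(ex && pyIsUnknown r))).map altLabel)).map
            (fun k => (((repos.filter (fun r => !(ex && pyIsUnknown r))).map altLabel).count k : Int)) := by
      show (PySem.Dict.counter _).items.map Prod.snd = _
      rw [PySem.Dict.items_counter, List.map_map]
      rfl
    rw [hv, sum_counts_eq_length]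
    simp

-- ===== VERDICT (by name: the statement is the Claim_ definition above) =====
theorem lang_distribution_spec : Claim_equal_lang_distribution := by
  intro repos ex _
  unfold Spec_lang_distribution
  exact lang_distribution_eq repos ex
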